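-- pv_equiv track=rewrite | github.com/xyliu09/DailyPractice | DailyPractice/String/1181_Before_and_After_Puzzle.py | beforeAndAfterPuzzles
-- ===== SOURCE A (Python) =====
-- from typing import List
--
-- def beforeAndAfterPuzzles(phrases: List[str]) -> List[str]:
--     words = []
--     for p in phrases:
--         words.append(p.split())
--     res = set()
--     for i in range(len(words)):
--         for w2 in words[:i]+words[i+1:]:
--             if words[i][-1] == w2[0]:
--                 r = ' '.join(words[i][:-1] + w2)
--                 if r not in res:
--                     res.add(r)
--     return sorted(list(res))
-- ===== SOURCE B (Python) =====
-- from typing import List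
--
-- def beforeAndAfterPuzzles(phrases: List[str]) -> List[str]:
--     words = [p.split() for p in phrases]
--     by_first = {}
--     for j, w in enumerate(words):
--         by_first.setdefault(w[0], []).append(j)
--     res = set()
--     for i, w in enumerate(words):
--         for j in by_first.get(w[-1], []):
--             if j != i:
--                 res.add(' '.join(w[:-1] + words[j]))
--     return sorted(res)
-- ===== Notes on version B (the rewrite author's own statement) =====
-- stated objective: alternative
-- what changed: Instead of comparing every phrase against every other (rebuilding words[:i]+words[i+1:] each iteration), B builds a dict indexing phrase positions by first word once and looks up each phrase's last word in it, visiting only actual matches (intended as faster; measured only ~1.2-1.4x on the generated inputs); Pre_ excludes lists containing a wordless phrase, on which A raises IndexError whenever another phrase is present and B's index build raises always (a lone wordless phrase makes A return []).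
-- outside the precondition, e.g. on beforeAndAfterPuzzles(['']): A returns [], B raises IndexError; on beforeAndAfterPuzzles(['', 'a b']): A raises IndexError, B raises IndexError
import Mathlib
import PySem

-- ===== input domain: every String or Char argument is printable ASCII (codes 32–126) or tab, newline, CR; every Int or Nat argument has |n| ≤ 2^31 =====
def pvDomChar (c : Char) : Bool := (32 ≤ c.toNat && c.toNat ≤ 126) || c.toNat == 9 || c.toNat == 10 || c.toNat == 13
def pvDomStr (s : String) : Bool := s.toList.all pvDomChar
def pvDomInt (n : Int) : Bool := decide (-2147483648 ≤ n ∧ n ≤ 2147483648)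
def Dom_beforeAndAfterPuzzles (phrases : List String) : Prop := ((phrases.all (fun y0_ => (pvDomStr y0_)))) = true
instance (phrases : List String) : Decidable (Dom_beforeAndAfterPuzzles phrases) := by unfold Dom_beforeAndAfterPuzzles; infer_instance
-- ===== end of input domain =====

-- B replaces A's all-pairs scan by a dict indexing phrase positions by first word, looked up by last word.

-- ===== PORT A =====
def beforeAndAfterPuzzles (phrases : List String) : List String :=
  let words := phrases.foldl (fun acc p => acc ++ [PySem.Str.split₀ p]) []
  let res : PySem.Set String :=
    (PySem.List.pyRange 0 (words.length : Int) 1).foldl (fun res i =>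
      (PySem.List.slice words none (some i) ++ PySem.List.slice words (some (i + 1)) none).foldl
        (fun res w2 =>
          if PySem.List.pyGetD (PySem.List.pyGetD words i []) (-1) "" = PySem.List.pyGetD w2 0 "" then
            PySem.Set.add res
              (PySem.Str.join " " (PySem.List.slice (PySem.List.pyGetD words i []) none (some (-1)) ++ w2))
          else res) res)
      PySem.Set.empty
  PySem.List.sorted res (fun x => x) false

-- ===== PORT B =====
def beforeAndAfterPuzzles_alt (phrases : List String) : List String :=
  let words := phrases.map PySem.Str.split₀
  let byFirst : PySem.Dict String (List Int) :=
    (PySem.List.enumerate words).foldl (fun d jw =>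
      d.insert (PySem.List.pyGetD jw.2 0 "")
        (d.getD (PySem.List.pyGetD jw.2 0 "") [] ++ [jw.1])) PySem.Dict.empty
  let res : PySem.Set String :=
    (PySem.List.enumerate words).foldl (fun res iw =>
      (byFirst.getD (PySem.List.pyGetD iw.2 (-1) "") []).foldl (fun res j =>
        if j ≠ iw.1 then
          PySem.Set.add res
            (PySem.Str.join " " (PySem.List.slice iw.2 none (some (-1)) ++ PySem.List.pyGetD words j []))
        else res) res)
      PySem.Set.empty
  PySem.List.sorted res (fun x => x) false

-- ===== PRECONDITION & SPEC =====
-- Pre_ excludes lists containing a wordless phrase, on which A raises IndexError whenever another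
-- phrase is present and B's index build raises always (a lone wordless phrase makes A return []).
def Pre_beforeAndAfterPuzzles (phrases : List String) : Prop :=
  ∀ p ∈ phrases, PySem.Str.split₀ p ≠ []
instance (phrases : List String) : Decidable (Pre_beforeAndAfterPuzzles phrases) := by
  unfold Pre_beforeAndAfterPuzzles; infer_instance
def pvWitness_beforeAndAfterPuzzles : List String := ["writing code", "code rocks"]

def Spec_beforeAndAfterPuzzles (phrases : List String) (out : List String) : Prop :=
  out = beforeAndAfterPuzzles_alt phrases
instance (phrases : List String) (out : List String) : Decidable (Spec_beforeAndAfterPuzzles phrases out) := by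
  unfold Spec_beforeAndAfterPuzzles; infer_instance

-- ===== CLAIM (what is proved, stated in full; the proofs are below) =====
def Claim_equal_beforeAndAfterPuzzles : Prop := ∀ (phrases : List String), Dom_beforeAndAfterPuzzles phrases → Pre_beforeAndAfterPuzzles phrases → Spec_beforeAndAfterPuzzles phrases (beforeAndAfterPuzzles phrases)

-- ===== LEMMAS AND PROOFS =====

-- the joined result for an ordered pair of word lists
def pvJoin (wi wj : List String) : String :=
  PySem.Str.join " " (PySem.List.slice wi none (some (-1)) ++ wj)

-- membership through a fold whose step adds elements described by Q
theorem pv_mem_foldl_step {α β : Type} [BEq β] [LawfulBEq β]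
    (g : PySem.Set β → α → PySem.Set β) (Q : α → β → Prop)
    (hg : ∀ s a y, y ∈ g s a ↔ y ∈ s ∨ Q a y) :
    ∀ (l : List α) (s : PySem.Set β) (y : β), y ∈ l.foldl g s ↔ y ∈ s ∨ ∃ a ∈ l, Q a y := by
  intro l
  induction l with
  | nil => simp
  | cons a t ih =>
    intro s y
    simp only [List.foldl_cons, ih, hg, List.mem_cons]
    constructor
    · rintro ((h | h) | ⟨b, hb, h⟩)
      · exact Or.inl h
      · exact Or.inr ⟨a, Or.inl rfl, h⟩
      · exact Or.inr ⟨b, Or.inr hb, h⟩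
    · rintro (h | ⟨b, (rfl | hb), h⟩)
      · exact Or.inl (Or.inl h)
      · exact Or.inl (Or.inr h)
      · exact Or.inr ⟨b, hb, h⟩

-- nodup through a fold whose step preserves Nodup
theorem pv_nodup_foldl_step {α β : Type}
    (g : List β → α → List β) (hg : ∀ s a, s.Nodup → (g s a).Nodup) :
    ∀ (l : List α) (s : List β), s.Nodup → (l.foldl g s).Nodup := by
  intro l
  induction l with
  | nil => intro s h; simpa using h
  | cons a t ih => intro s h; exact ih _ (hg _ _ h)

-- the grouping dict: getD of the built index
theorem pv_getD_group (l : List (Int × List String)) (d : PySem.Dict String (List Int)) (f : String) :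
    (l.foldl (fun d jw =>
      d.insert (PySem.List.pyGetD jw.2 0 "")
        (d.getD (PySem.List.pyGetD jw.2 0 "") [] ++ [jw.1])) d).getD f []
    = d.getD f [] ++ (l.filter (fun jw => PySem.List.pyGetD jw.2 0 "" == f)).map (·.1) := by
  induction l generalizing d with
  | nil => simp
  | cons jw t ih =>
    by_cases hf : PySem.List.pyGetD jw.2 0 "" = f
    · simp only [List.foldl_cons, ih, hf, PySem.Dict.getD_insert_self, List.filter_cons]
      simp
    · simp only [List.foldl_cons, ih, List.filter_cons]
      rw [PySem.Dict.getD_insert_of_ne]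
      · simp [hf]
      · exact fun h => hf h.symm

theorem pv_mem_take_drop {α : Type} (xs : List α) (k : Nat) (w : α) (hk : k < xs.length) :
    w ∈ xs.take k ++ xs.drop (k + 1) ↔ ∃ (j : Nat) (hj : j < xs.length), j ≠ k ∧ xs[j] = w := by
  rw [List.mem_append]
  constructor
  · rintro (h | h)
    · obtain ⟨i, hi, rfl⟩ := List.mem_take_iff_getElem.mp h
      exact ⟨i, by omega, by omega, by simp⟩
    · obtain ⟨i, hi, rfl⟩ := List.mem_drop_iff_getElem.mp h
      exact ⟨k + 1 + i, by omega, by omega, by simp⟩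
  · rintro ⟨j, hj, hne, rfl⟩
    by_cases h : j < k
    · exact Or.inl (List.mem_take_iff_getElem.mpr ⟨j, by omega, by simp⟩)
    · refine Or.inr (List.mem_drop_iff_getElem.mpr ⟨j - (k + 1), by omega, ?_⟩)
      congr 1; omega

-- B-side pieces
def pvByFirst (wds : List (List String)) : PySem.Dict String (List Int) :=
  (PySem.List.enumerate wds).foldl (fun d jw =>
    d.insert (PySem.List.pyGetD jw.2 0 "")
      (d.getD (PySem.List.pyGetD jw.2 0 "") [] ++ [jw.1])) PySem.Dict.empty

def pvSetB (wds : List (List String)) : PySem.Set String :=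
  (PySem.List.enumerate wds).foldl (fun res iw =>
    ((pvByFirst wds).getD (PySem.List.pyGetD iw.2 (-1) "") []).foldl (fun res j =>
      if j ≠ iw.1 then
        PySem.Set.add res
          (PySem.Str.join " " (PySem.List.slice iw.2 none (some (-1)) ++ PySem.List.pyGetD wds j []))
      else res) res)
    PySem.Set.empty

theorem pv_alt_eq (phrases : List String) :
    beforeAndAfterPuzzles_alt phrases
      = PySem.List.sorted (pvSetB (phrases.map PySem.Str.split₀)) (fun x => x) false := rfl

theorem pv_mem_byFirst (wds : List (List String)) (f : String) (j : Int) :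
    j ∈ (pvByFirst wds).getD f [] ↔
      ∃ (k : Nat) (hk : k < wds.length), PySem.List.pyGetD wds[k] 0 "" = f ∧ j = (k : Int) := by
  unfold pvByFirst
  rw [pv_getD_group]
  simp only [PySem.Dict.getD_empty, List.nil_append, List.mem_map, List.mem_filter,
    PySem.List.mem_enumerate_iff]
  constructor
  · rintro ⟨p, ⟨⟨k, hk, rfl⟩, hh⟩, rfl⟩
    exact ⟨k, hk, by simpa using hh, by simp⟩
  · rintro ⟨k, hk, hh, rfl⟩
    exact ⟨((k : Int), wds[k]), ⟨⟨k, hk, by simp⟩, by simpa using hh⟩, rfl⟩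

theorem pv_mem_setB (wds : List (List String)) (r : String) :
    r ∈ pvSetB wds ↔
      ∃ (i k : Nat) (hi : i < wds.length) (hk : k < wds.length), k ≠ i ∧
        PySem.List.pyGetD wds[k] 0 "" = PySem.List.pyGetD wds[i] (-1) "" ∧
        r = pvJoin wds[i] wds[k] := by
  unfold pvSetB
  rw [pv_mem_foldl_step _
    (fun iw y => ∃ j ∈ (pvByFirst wds).getD (PySem.List.pyGetD iw.2 (-1) "") [],
      j ≠ iw.1 ∧ y = PySem.Str.join " "
        (PySem.List.slice iw.2 none (some (-1)) ++ PySem.List.pyGetD wds j []))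
    ?hg]
  case hg =>
    intro s iw y
    rw [pv_mem_foldl_step _
      (fun j y => j ≠ iw.1 ∧ y = PySem.Str.join " "
        (PySem.List.slice iw.2 none (some (-1)) ++ PySem.List.pyGetD wds j [])) ?hgi]
    case hgi =>
      intro s j y
      by_cases hj : j ≠ iw.1 <;> simp [hj, PySem.Set.mem_add]
  · simp only [show (PySem.Set.empty : PySem.Set String) = [] from rfl, List.not_mem_nil,
      false_or, PySem.List.mem_enumerate_iff]
    constructor
    · rintro ⟨p, ⟨i, hi, rfl⟩, j, hjmem, hja, hr⟩
      simp only at hjmem hja hr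
      obtain ⟨k, hk, hh, rfl⟩ := (pv_mem_byFirst wds _ j).mp hjmem
      refine ⟨i, k, hi, hk, ?_, hh, ?_⟩
      · intro h; subst h; simp at hja
      · rw [hr, PySem.List.pyGetD_natCast, List.getD_eq_getElem _ _ hk]; rfl
    · rintro ⟨i, k, hi, hk, hki, hmatch, rfl⟩
      refine ⟨((0 : Int) + (i : Int), wds[i]), ⟨i, hi, rfl⟩, (k : Int),
        (pv_mem_byFirst wds _ _).mpr ⟨k, hk, by simpa using hmatch, rfl⟩, ?_, ?_⟩
      · simpa using fun h => hki (by exact_mod_cast h)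
      · rw [PySem.List.pyGetD_natCast, List.getD_eq_getElem _ _ hk]; rfl

-- A-side pieces
def pvSetA (wds : List (List String)) : PySem.Set String :=
  (PySem.List.pyRange 0 (wds.length : Int) 1).foldl (fun res i =>
    (PySem.List.slice wds none (some i) ++ PySem.List.slice wds (some (i + 1)) none).foldl
      (fun res w2 =>
        if PySem.List.pyGetD (PySem.List.pyGetD wds i []) (-1) "" = PySem.List.pyGetD w2 0 "" then
          PySem.Set.add res
            (PySem.Str.join " " (PySem.List.slice (PySem.List.pyGetD wds i []) none (some (-1)) ++ w2))
        else res) res)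
    PySem.Set.empty

theorem pv_A_eq (phrases : List String) :
    beforeAndAfterPuzzles phrases
      = PySem.List.sorted (pvSetA (phrases.map PySem.Str.split₀)) (fun x => x) false := by
  simp only [beforeAndAfterPuzzles, pvSetA, PySem.List.foldl_append_singleton_eq_map,
    List.nil_append]

theorem pv_mem_setA (wds : List (List String)) (r : String) :
    r ∈ pvSetA wds ↔
      ∃ (i k : Nat) (hi : i < wds.length) (hk : k < wds.length), k ≠ i ∧
        PySem.List.pyGetD wds[k] 0 "" = PySem.List.pyGetD wds[i] (-1) "" ∧
        r = pvJoin wds[i] wds[k] := by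
  unfold pvSetA
  rw [pv_mem_foldl_step _
    (fun i y => ∃ w2 ∈ PySem.List.slice wds none (some i) ++ PySem.List.slice wds (some (i + 1)) none,
      PySem.List.pyGetD (PySem.List.pyGetD wds i []) (-1) "" = PySem.List.pyGetD w2 0 "" ∧
      y = PySem.Str.join " " (PySem.List.slice (PySem.List.pyGetD wds i []) none (some (-1)) ++ w2))
    ?hg]
  case hg =>
    intro s i y
    rw [pv_mem_foldl_step _
      (fun w2 y => PySem.List.pyGetD (PySem.List.pyGetD wds i []) (-1) "" = PySem.List.pyGetD w2 0 "" ∧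
        y = PySem.Str.join " " (PySem.List.slice (PySem.List.pyGetD wds i []) none (some (-1)) ++ w2))
      ?hgi]
    case hgi =>
      intro s w2 y
      by_cases hc : PySem.List.pyGetD (PySem.List.pyGetD wds i []) (-1) "" = PySem.List.pyGetD w2 0 "" <;>
        simp [hc, PySem.Set.mem_add]
  · simp only [show (PySem.Set.empty : PySem.Set String) = [] from rfl, List.not_mem_nil,
      false_or, PySem.List.mem_pyRange_one]
    constructor
    · rintro ⟨i, ⟨hi0, hin⟩, w2, hw2, hmatch, rfl⟩
      have hitn : i.toNat < wds.length := by omega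
      have hieq : PySem.List.pyGetD wds i [] = wds[i.toNat] :=
        PySem.List.pyGetD_eq_getElem wds [] hi0 hin
      rw [PySem.List.slice_to wds hi0, PySem.List.slice_from wds (by omega : (0:Int) ≤ i + 1)] at hw2
      have ht1 : (i + 1).toNat = i.toNat + 1 := by omega
      rw [ht1] at hw2
      obtain ⟨j, hj, hji, rfl⟩ := (pv_mem_take_drop wds i.toNat _ hitn).mp hw2
      rw [hieq] at hmatch ⊢
      exact ⟨i.toNat, j, hitn, hj, fun h => hji h, hmatch.symm, rfl⟩
    · rintro ⟨i, k, hi, hk, hki, hmatch, rfl⟩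
      have hi0 : (0:Int) ≤ (i : Int) := by omega
      have hieq : PySem.List.pyGetD wds (i : Int) [] = wds[i] := by
        rw [PySem.List.pyGetD_eq_getElem wds [] hi0 (by exact_mod_cast hi)]
        simp
      refine ⟨(i : Int), ⟨hi0, by exact_mod_cast hi⟩, wds[k], ?_, ?_, ?_⟩
      · rw [PySem.List.slice_to wds hi0, PySem.List.slice_from wds (by omega : (0:Int) ≤ (i:Int) + 1)]
        have ht1 : ((i : Int) + 1).toNat = i + 1 := by omega
        rw [ht1, Int.toNat_natCast]
        exact (pv_mem_take_drop wds i _ (by omega)).mpr ⟨k, hk, hki, rfl⟩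
      · rw [hieq]; exact hmatch.symm
      · rw [hieq]; rfl

theorem pv_nodup_setA (wds : List (List String)) : (pvSetA wds).Nodup := by
  unfold pvSetA
  refine pv_nodup_foldl_step _ ?_ _ _ (by simp [PySem.Set.empty])
  intro s i hs
  refine pv_nodup_foldl_step _ ?_ _ _ hs
  intro s w2 hs2
  split
  · exact PySem.Set.nodup_add _ _ hs2
  · exact hs2

theorem pv_nodup_setB (wds : List (List String)) : (pvSetB wds).Nodup := by
  unfold pvSetB
  refine pv_nodup_foldl_step _ ?_ _ _ (by simp [PySem.Set.empty])
  intro s iw hs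
  refine pv_nodup_foldl_step _ ?_ _ _ hs
  intro s j hs2
  split
  · exact PySem.Set.nodup_add _ _ hs2
  · exact hs2

-- ===== VERDICT (by name: the statement is the Claim_ definition above) =====
theorem beforeAndAfterPuzzles_spec : Claim_equal_beforeAndAfterPuzzles := by
  intro phrases _ hpre
  unfold Spec_beforeAndAfterPuzzles
  rw [pv_A_eq, pv_alt_eq, PySem.List.sorted_id_eq_sorted_id_iff_perm]
  refine (List.perm_ext_iff_of_nodup (pv_nodup_setA _) (pv_nodup_setB _)).mpr ?_
  intro r
  rw [pv_mem_setA, pv_mem_setB]
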